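-- pv_equiv track=rewrite | github.com/bennv14/python_ptit | TongHop.py | soLocPhat
-- ===== SOURCE A (Python) =====
-- def soLocPhat(number):
--     count=0
--     for i in number:
--         if i=='6':
--             count=0
--         elif i=='8':
--             count+=1
--             if count>=3:
--                 return False
--         else:
--             return False
--
--     return True
-- ===== SOURCE B (Python) =====
-- def soLocPhat(number):
--     return all(c in ('6', '8') for c in number) and '888' not in number
-- ===== Notes on version B (the rewrite author's own statement) =====
-- stated objective: simpler
-- what changed: Replaced the loop-carried counter state machine with two independent stateless checks: every character is one of the two allowed digits, and the three-eights substring does not occur anywhere.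
import Mathlib
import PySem

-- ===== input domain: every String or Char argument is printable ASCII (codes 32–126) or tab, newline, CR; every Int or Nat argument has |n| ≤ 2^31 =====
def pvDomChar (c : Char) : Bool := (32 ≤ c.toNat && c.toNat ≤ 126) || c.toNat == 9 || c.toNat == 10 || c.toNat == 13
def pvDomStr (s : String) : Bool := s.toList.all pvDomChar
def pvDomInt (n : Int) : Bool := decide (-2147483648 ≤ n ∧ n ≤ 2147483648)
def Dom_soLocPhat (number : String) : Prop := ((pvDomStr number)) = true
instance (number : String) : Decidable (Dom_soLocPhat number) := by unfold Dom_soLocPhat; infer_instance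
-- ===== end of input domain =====

-- B replaces A's loop-carried counter state machine with two independent stateless
-- checks (all characters valid, and no '888' substring); objective: simpler.

-- ===== PORT A =====
-- the for-loop over the characters with the running counter and the early returns
def pvLoopA : List Char → Int → Bool
  | [], _ => true
  | c :: cs, count =>
    if c = '6' then pvLoopA cs 0
    else if c = '8' then
      if count + 1 ≥ 3 then false else pvLoopA cs (count + 1)
    else false

def soLocPhat (number : String) : Bool := pvLoopA number.toList 0

-- ===== PORT B =====
def soLocPhat_alt (number : String) : Bool :=
  number.toList.all (fun c => c == '6' || c == '8') && !PySem.Str.isIn "888" number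

-- ===== PRECONDITION & SPEC =====
def Spec_soLocPhat (number : String) (out : Bool) : Prop := out = soLocPhat_alt number
instance (number : String) (out : Bool) : Decidable (Spec_soLocPhat number out) := by unfold Spec_soLocPhat; infer_instance

-- ===== CLAIM (what is proved, stated in full; the proofs are below) =====
def Claim_equal_soLocPhat : Prop := ∀ (number : String), Dom_soLocPhat number → Spec_soLocPhat number (soLocPhat number)

-- ===== LEMMAS AND PROOFS =====

-- A's loop, with the invalid-character early return factored out and a Nat counter
def pvHasTriple : List Char → Nat → Bool
  | [], _ => false
  | c :: cs, count =>
    if c = '6' then pvHasTriple cs 0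
    else if c = '8' then (decide (count + 1 ≥ 3) || pvHasTriple cs (count + 1))
    else false

theorem pvLoopA_eq (cs : List Char) : ∀ (count : Nat),
    pvLoopA cs (count : Int) =
      (cs.all (fun c => c == '6' || c == '8') && !pvHasTriple cs count) := by
  induction cs with
  | nil => intro count; simp [pvLoopA, pvHasTriple]
  | cons c cs ih =>
    intro count
    by_cases h6 : c = '6'
    · have h0 := ih 0
      rw [Nat.cast_zero] at h0
      simp [pvLoopA, pvHasTriple, h6, h0]
    · by_cases h8 : c = '8'
      · by_cases hge : count + 1 ≥ 3
        · have hge' : ((count : Int) + 1 ≥ 3) := by exact_mod_cast hge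
          simp [pvLoopA, pvHasTriple, h8, hge, hge']
        · have hge' : ¬ ((count : Int) + 1 ≥ 3) := by exact_mod_cast hge
          have hc : ((count : Int) + 1) = ((count + 1 : Nat) : Int) := by push_cast; ring
          have h1 := ih (count + 1)
          rw [← hc] at h1
          simp [pvLoopA, pvHasTriple, h8, hge, hge', h1]
      · simp [pvLoopA, pvHasTriple, h6, h8]

theorem pvHasTriple_iff (cs : List Char) : ∀ (count : Nat), count ≤ 2 →
    cs.all (fun c => c == '6' || c == '8') = true →
    (pvHasTriple cs count = true ↔
      (List.replicate (3 - count) '8' <+: cs ∨ ['8', '8', '8'] <:+: cs)) := by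
  induction cs with
  | nil =>
    intro count hle _
    interval_cases count <;> simp [pvHasTriple, List.replicate]
  | cons c cs ih =>
    intro count hle hall
    have hall' : cs.all (fun c => c == '6' || c == '8') = true := by
      simp only [List.all_cons, Bool.and_eq_true] at hall; exact hall.2
    have hc : c = '6' ∨ c = '8' := by
      simp only [List.all_cons, Bool.and_eq_true, Bool.or_eq_true, beq_iff_eq] at hall
      exact hall.1
    rcases hc with h6 | h8
    · subst h6
      interval_cases count <;>
        simp [pvHasTriple, List.replicate, ih 0 (by omega) hall',
          List.infix_cons_iff, List.cons_prefix_cons] <;>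
        exact fun h => h.isInfix
    · subst h8
      interval_cases count
      · -- count = 0
        have h1 := ih 1 (by omega) hall'
        norm_num at h1
        simp [pvHasTriple, h1, List.replicate, List.infix_cons_iff,
          List.cons_prefix_cons]
      · -- count = 1
        have h2 := ih 2 (by omega) hall'
        norm_num at h2
        simp [pvHasTriple, h2, List.replicate, List.infix_cons_iff,
          List.cons_prefix_cons]
        constructor
        · intro h
          rcases h with h | h
          · exact Or.inl h
          · exact Or.inr (Or.inr h)
        · intro h
          rcases h with h | h | h
          · exact Or.inl h
          · exact Or.inl (List.IsPrefix.trans (by decide : ['8'] <+: ['8', '8']) h)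
          · exact Or.inr h
      · -- count = 2
        simp [pvHasTriple, List.replicate, List.cons_prefix_cons]

-- ===== VERDICT (by name: the statement is the Claim_ definition above) =====
theorem soLocPhat_spec : Claim_equal_soLocPhat := by
  intro number _
  unfold Spec_soLocPhat soLocPhat soLocPhat_alt
  have h0 : (0 : Int) = ((0 : Nat) : Int) := by norm_num
  rw [h0, pvLoopA_eq]
  by_cases hall : number.toList.all (fun c => c == '6' || c == '8') = true
  · rw [hall]
    simp only [Bool.true_and]
    congr 1
    have hiff := pvHasTriple_iff number.toList 0 (by omega) hall
    have hsub : ("888" : String).toList = ['8', '8', '8'] := by decide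
    have hisin := PySem.Str.isIn_iff_infix "888" number
    rw [hsub] at hisin
    have habs : (List.replicate (3 - 0) '8' <+: number.toList ∨
        ['8', '8', '8'] <:+: number.toList) ↔ ['8', '8', '8'] <:+: number.toList := by
      constructor
      · intro h
        rcases h with h | h
        · exact (by simpa [List.replicate] using h : ['8', '8', '8'] <+: number.toList).isInfix
        · exact h
      · exact Or.inr
    rw [habs] at hiff
    rw [← hisin] at hiff
    exact Bool.coe_iff_coe.mp hiff
  · simp [Bool.eq_false_iff.mpr hall]
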